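-- pv_equiv track=rewrite | github.com/ealauff/advent-of-code | 06/06-p2.py | calc_num_offspring
-- ===== SOURCE A (Python) =====
-- def calc_num_offspring(starting_age, days_left):
--     if not '{}:{}'.format(starting_age, days_left) in fish_memo:
--
--         # Not enough days to have any offspring
--         if days_left - (starting_age + 1) < 0:
--             return 0
--
--         else:
--             offspring = 0
--
--             # Will have an offspring every 7 days after the first time age gets to 0 then resets
--             for day in range(days_left - (starting_age + 1), -1, -7):
--                 offspring += 1
--                 offspring += calc_num_offspring(8, day)
--
--             fish_memo['{}:{}'.format(starting_age, days_left)] = offspring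
--
--     return fish_memo['{}:{}'.format(starting_age, days_left)]
--
-- fish_memo = {}
-- ===== SOURCE B (Python) =====
-- def calc_num_offspring(starting_age, days_left):
--     # Bottom-up linear DP: g(d) = offspring of a timer-8 fish over d days satisfies
--     # g(d) = 0 for d < 9 and g(d) = g(d-7) + g(d-9) + 1 otherwise; the answer for
--     # (starting_age, days_left) equals g(days_left - starting_age + 8).
--     n = days_left - starting_age          # number of DP steps; target index is n + 8
--     if n < 1:
--         return 0
--     g0 = g1 = g2 = g3 = g4 = g5 = g6 = g7 = g8 = 0   # sliding window g(k) .. g(k+8)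
--     for _ in range(n):
--         g0, g1, g2, g3, g4, g5, g6, g7, g8 = g1, g2, g3, g4, g5, g6, g7, g8, g0 + g2 + 1
--     return g8
-- ===== Notes on version B (the rewrite author's own statement) =====
-- stated objective: alternative
-- what changed: Replaces A's memoized top-down recursion over 7-day spawn chains with a bottom-up iteration of the recurrence g(d) = g(d-7) + g(d-9) + 1 kept in a 9-value sliding window of scalars (no recursion, no cache).
import Mathlib
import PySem

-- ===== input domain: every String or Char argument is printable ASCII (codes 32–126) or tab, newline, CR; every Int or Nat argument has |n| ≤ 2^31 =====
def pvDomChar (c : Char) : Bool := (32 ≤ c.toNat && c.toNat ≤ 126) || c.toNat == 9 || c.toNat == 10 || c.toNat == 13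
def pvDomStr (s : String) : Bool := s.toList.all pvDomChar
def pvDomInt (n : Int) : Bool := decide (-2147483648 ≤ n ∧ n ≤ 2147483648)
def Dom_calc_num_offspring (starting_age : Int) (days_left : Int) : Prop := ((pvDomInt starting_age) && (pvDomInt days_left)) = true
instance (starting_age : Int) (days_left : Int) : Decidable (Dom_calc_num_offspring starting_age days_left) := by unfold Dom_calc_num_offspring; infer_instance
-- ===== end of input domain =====

-- B replaces A's memoized top-down recursion over spawn chains with a bottom-up iteration of the
-- recurrence g(d) = g(d-7) + g(d-9) + 1 over a 9-value sliding window; return values proved equal.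

-- ===== PORT A =====
-- A's fish_memo hash dict is threaded through the recursion as a Std.HashMap (first
-- component of each result).  Python's key '{}:{}'.format(starting_age, days_left) is a
-- string encoding of the argument pair used only for hashing; it is ported as the pair
-- (starting_age, days_left) itself — the same lookups hit and miss.  The module-level
-- 'fish_memo = {}' means each top-level call starts from the empty cache (the cache only
-- ever stores the values this recursion computes, so persistence does not change results).
-- The 'for day in range(r, -1, -7)' loop is the countdown recursion calcLoopA
-- (same iterates, same accumulator updates, memo threaded left to right).
mutual
  def calcMemoA (m : Std.HashMap (Int × Int) Int) (starting_age : Int) (days_left : Int) :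
      Std.HashMap (Int × Int) Int × Int :=
    if ¬ m.contains (starting_age, days_left) then   -- if not key in fish_memo:
      if days_left - (starting_age + 1) < 0 then (m, 0)   -- return 0 (no memo write, as in A)
      else
        let p := calcLoopA m (days_left - (starting_age + 1)) 0
        let m2 := p.1.insert (starting_age, days_left) p.2   -- fish_memo[key] = offspring
        (m2, m2.getD (starting_age, days_left) 0)            -- return fish_memo[key]
    else (m, m.getD (starting_age, days_left) 0)             -- return fish_memo[key]
  termination_by (days_left - starting_age).toNat * 2 + 1
  decreasing_by omega

  -- loop body: offspring += 1; offspring += calc_num_offspring(8, day); next day -= 7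
  def calcLoopA (m : Std.HashMap (Int × Int) Int) (day : Int) (offspring : Int) :
      Std.HashMap (Int × Int) Int × Int :=
    if -1 < day then
      let q := calcMemoA m 8 day
      calcLoopA q.1 (day - 7) (offspring + 1 + q.2)
    else (m, offspring)
  termination_by (day + 1).toNat * 2
  decreasing_by
    · omega
    · omega
end

def calc_num_offspring (starting_age : Int) (days_left : Int) : Int :=
  (calcMemoA ∅ starting_age days_left).2

-- ===== PORT B =====
-- the 9-tuple of DP variables (g0, …, g8) of Source B
def calcStepB (w : Int × Int × Int × Int × Int × Int × Int × Int × Int) :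
    Int × Int × Int × Int × Int × Int × Int × Int × Int :=
  match w with
  | (g0, g1, g2, g3, g4, g5, g6, g7, g8) => (g1, g2, g3, g4, g5, g6, g7, g8, g0 + g2 + 1)

-- 'for _ in range(n):' — apply the simultaneous assignment n times
def calcIterB (k : Nat) (w : Int × Int × Int × Int × Int × Int × Int × Int × Int) :
    Int × Int × Int × Int × Int × Int × Int × Int × Int :=
  match k with
  | 0 => w
  | k + 1 => calcIterB k (calcStepB w)

def calc_num_offspring_alt (starting_age : Int) (days_left : Int) : Int :=
  let n := days_left - starting_age
  if n < 1 then 0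
  else (calcIterB n.toNat (0, 0, 0, 0, 0, 0, 0, 0, 0)).2.2.2.2.2.2.2.2

-- ===== PRECONDITION & SPEC =====
-- Pre_ excludes inputs with days_left - starting_age > 8000: there A's recursion is about
-- (days_left - starting_age)/9 frames deep and overruns CPython's default recursion limit
-- (RecursionError, observed from roughly 8980 upward); whether a call just below the limit
-- returns depends on the residual stack and on what an earlier call left in fish_memo, so
-- the bound is conservative and excludes a band of inputs on which a cold A still returns.
def Pre_calc_num_offspring (starting_age : Int) (days_left : Int) : Prop :=
  days_left - starting_age ≤ 8000
instance (starting_age : Int) (days_left : Int) : Decidable (Pre_calc_num_offspring starting_age days_left) := by unfold Pre_calc_num_offspring; infer_instance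
def pvWitness_calc_num_offspring : Int × Int := (8, 256)

def Spec_calc_num_offspring (starting_age : Int) (days_left : Int) (out : Int) : Prop := out = calc_num_offspring_alt starting_age days_left
instance (starting_age : Int) (days_left : Int) (out : Int) : Decidable (Spec_calc_num_offspring starting_age days_left out) := by unfold Spec_calc_num_offspring; infer_instance

-- ===== CLAIM (what is proved, stated in full; the proofs are below) =====
def Claim_equal_calc_num_offspring : Prop := ∀ (starting_age : Int) (days_left : Int), Dom_calc_num_offspring starting_age days_left → Pre_calc_num_offspring starting_age days_left → Spec_calc_num_offspring starting_age days_left (calc_num_offspring starting_age days_left)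

-- ===== LEMMAS AND PROOFS =====

-- the mathematical value: offspring of a timer-8 fish over d days
def G (n : Nat) : Int :=
  if n < 9 then 0 else G (n - 7) + G (n - 9) + 1
termination_by n
decreasing_by all_goals omega

theorem G_small {n : Nat} (h : n < 9) : G n = 0 := by rw [G]; simp [h]

theorem G_rec {n : Nat} (h : 9 ≤ n) : G n = G (n - 7) + G (n - 9) + 1 := by
  rw [G]; simp [Nat.not_lt.mpr h]

-- B computes G: the window invariant
theorem iterB_window : ∀ (k j : Nat),
    calcIterB k (G j, G (j+1), G (j+2), G (j+3), G (j+4), G (j+5), G (j+6), G (j+7), G (j+8))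
      = (G (j+k), G (j+k+1), G (j+k+2), G (j+k+3), G (j+k+4), G (j+k+5), G (j+k+6), G (j+k+7), G (j+k+8)) := by
  intro k
  induction k with
  | zero => intro j; simp [calcIterB]
  | succ k ih =>
    intro j
    have hrec : G (j + 9) = G j + G (j + 2) + 1 := by
      rw [G_rec (by omega)]
      have h7 : j + 9 - 7 = j + 2 := by omega
      have h9 : j + 9 - 9 = j := by omega
      rw [h7, h9]; ring
    have hstep : calcStepB (G j, G (j+1), G (j+2), G (j+3), G (j+4), G (j+5), G (j+6), G (j+7), G (j+8))
        = (G (j+1), G (j+1+1), G (j+1+2), G (j+1+3), G (j+1+4), G (j+1+5), G (j+1+6), G (j+1+7), G (j+1+8)) := by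
      simp only [calcStepB]
      have : j + 1 + 8 = j + 9 := by omega
      rw [this, hrec]
    rw [calcIterB, hstep, ih (j+1)]
    have e : j + 1 + k = j + (k + 1) := by omega
    rw [e]

theorem alt_eq_G (sa d : Int) : calc_num_offspring_alt sa d = G ((d - sa + 8).toNat) := by
  unfold calc_num_offspring_alt
  by_cases h : d - sa < 1
  · simp only [h, if_true]
    exact (G_small (by omega)).symm
  · simp only [h, if_false]
    have hz : ∀ i : Nat, i < 9 → G i = 0 := fun i hi => G_small hi
    have h0 : ((0 : Int), (0:Int), (0:Int), (0:Int), (0:Int), (0:Int), (0:Int), (0:Int), (0:Int))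
        = (G 0, G 1, G 2, G 3, G 4, G 5, G 6, G 7, G 8) := by
      simp [hz 0, hz 1, hz 2, hz 3, hz 4, hz 5, hz 6, hz 7, hz 8]
    rw [h0]
    have := iterB_window (d - sa).toNat 0
    simp only [Nat.zero_add] at this
    rw [this]
    have : (d - sa).toNat + 8 = (d - sa + 8).toNat := by omega
    rw [this]

-- the memo invariant: every cached value is the mathematical one
def MemoOK (m : Std.HashMap (Int × Int) Int) : Prop :=
  ∀ (sa d v : Int), m[((sa, d) : Int × Int)]? = some v → v = G ((d - sa + 8).toNat)

-- combined correctness of the memoized recursion and its loop, by strong induction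
-- on the same measure that proves termination
theorem memoA_main : ∀ (n : Nat),
    (∀ (sa d : Int) (m : Std.HashMap (Int × Int) Int),
        (d - sa).toNat * 2 + 1 ≤ n → MemoOK m →
        MemoOK (calcMemoA m sa d).1 ∧ (calcMemoA m sa d).2 = G ((d - sa + 8).toNat)) ∧
    (∀ (day off : Int) (m : Std.HashMap (Int × Int) Int),
        (day + 1).toNat * 2 ≤ n → MemoOK m →
        MemoOK (calcLoopA m day off).1 ∧
          (calcLoopA m day off).2 = off + (if day < 0 then 0 else G ((day + 9).toNat))) := by
  intro n
  induction n using Nat.strong_induction_on with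
  | _ n ih =>
    constructor
    · intro sa d m hn hm
      rw [calcMemoA]
      by_cases hc : m.contains (sa, d)
      · rw [if_neg (not_not_intro hc)]
        refine ⟨hm, ?_⟩
        rw [Std.HashMap.contains_eq_isSome_getElem?] at hc
        obtain ⟨v, hv⟩ := Option.isSome_iff_exists.mp hc
        rw [Std.HashMap.getD_eq_getD_getElem?, hv]
        exact hm sa d v hv
      · rw [if_pos hc]
        by_cases hlt : d - (sa + 1) < 0
        · simp only [hlt, if_true]
          exact ⟨hm, (G_small (by omega)).symm⟩
        · simp only [hlt, if_false]
          have hloop := (ih (n - 1) (by omega)).2 (d - (sa + 1)) 0 m (by omega) hm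
          set p := calcLoopA m (d - (sa + 1)) 0 with hp
          have hval : p.2 = G ((d - sa + 8).toNat) := by
            rw [hloop.2]
            have : ¬ (d - (sa + 1) < 0) := hlt
            simp only [this, if_false]
            have : (d - (sa + 1) + 9) = (d - sa + 8) := by ring
            rw [this]; ring
          constructor
          · intro sa' d' v hv
            rw [Std.HashMap.getElem?_insert] at hv
            by_cases he : ((sa, d) : Int × Int) == (sa', d')
            · simp only [he, if_true] at hv
              have : sa = sa' ∧ d = d' := by
                have := eq_of_beq he
                exact ⟨congrArg Prod.fst this, congrArg Prod.snd this⟩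
              obtain ⟨h1, h2⟩ := this
              subst h1; subst h2
              rw [← Option.some_inj.mp hv, hval]
            · simp only [he] at hv
              exact hloop.1 sa' d' v hv
          · simp only [Std.HashMap.getD_insert, BEq.rfl, if_true]
            exact hval
    · intro day off m hn hm
      rw [calcLoopA]
      by_cases hd : -1 < day
      · simp only [hd, if_true]
        have hcalc := (ih (n - 1) (by omega)).1 8 day m (by omega) hm
        set q := calcMemoA m 8 day with hq
        have hqv : q.2 = G (day.toNat) := by
          rw [hcalc.2]
          have : (day - 8 + 8) = day := by ring
          rw [this]
        have hnext := (ih (n - 1) (by omega)).2 (day - 7) (off + 1 + q.2) q.1 (by omega) hcalc.1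
        refine ⟨hnext.1, ?_⟩
        rw [hnext.2, hqv]
        have hrec : G ((day + 9).toNat) = G ((day + 2).toNat) + G (day.toNat) + 1 := by
          rw [G_rec (by omega)]
          have h7 : (day + 9).toNat - 7 = (day + 2).toNat := by omega
          have h9 : (day + 9).toNat - 9 = day.toNat := by omega
          rw [h7, h9]
        rw [if_neg (show ¬ day < 0 by omega)]
        by_cases h7 : day - 7 < 0
        · simp only [h7, if_true]
          rw [hrec, G_small (show (day + 2).toNat < 9 by omega)]
          ring
        · simp only [h7, if_false]
          have : (day - 7 + 9) = (day + 2) := by ring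
          rw [this, hrec]
          ring
      · simp only [hd, if_false]
        have : day < 0 := by omega
        simp only [this, if_true]
        exact ⟨hm, by ring⟩

theorem memoOK_empty : MemoOK (∅ : Std.HashMap (Int × Int) Int) := by
  intro sa d v hv
  simp at hv

theorem calcA_eq (sa d : Int) : calc_num_offspring sa d = G ((d - sa + 8).toNat) := by
  unfold calc_num_offspring
  exact ((memoA_main ((d - sa).toNat * 2 + 1)).1 sa d ∅ le_rfl memoOK_empty).2

-- ===== VERDICT (by name: the statement is the Claim_ definition above) =====
theorem calc_num_offspring_spec : Claim_equal_calc_num_offspring := by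
  intro sa d _ _
  unfold Spec_calc_num_offspring
  rw [alt_eq_G, calcA_eq]
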